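-- pv_equiv track=rewrite | github.com/chrisolat/database_splicer | main/modules/generate_schema.py | get_tree_relationship
-- ===== SOURCE A (Python) =====
-- def get_tree_relationship(table, friend, Trees):
--     result = []
--     for tree in Trees:
--         if table in Trees[tree]:
--             result.append(tree)
--
--     for tree in Trees:
--         if friend in Trees[tree]:
--             result.append(tree)
--
--     return result
-- ===== SOURCE B (Python) =====
-- def get_tree_relationship(table, friend, Trees):
--     # Inverted index: member value -> list of trees containing it (in tree order),
--     # then answer both queries by direct lookup.
--     index = {}
--     for tree, vals in Trees.items():
--         for v in set(vals):
--             index.setdefault(v, []).append(tree)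
--     return index.get(table, []) + index.get(friend, [])
-- ===== Notes on version B (the rewrite author's own statement) =====
-- stated objective: alternative
-- what changed: Replaces A's two membership scans over the dict with an inverted index (member value -> list of trees) built in one nested pass, after which both queries are plain dictionary lookups.
import Mathlib
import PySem

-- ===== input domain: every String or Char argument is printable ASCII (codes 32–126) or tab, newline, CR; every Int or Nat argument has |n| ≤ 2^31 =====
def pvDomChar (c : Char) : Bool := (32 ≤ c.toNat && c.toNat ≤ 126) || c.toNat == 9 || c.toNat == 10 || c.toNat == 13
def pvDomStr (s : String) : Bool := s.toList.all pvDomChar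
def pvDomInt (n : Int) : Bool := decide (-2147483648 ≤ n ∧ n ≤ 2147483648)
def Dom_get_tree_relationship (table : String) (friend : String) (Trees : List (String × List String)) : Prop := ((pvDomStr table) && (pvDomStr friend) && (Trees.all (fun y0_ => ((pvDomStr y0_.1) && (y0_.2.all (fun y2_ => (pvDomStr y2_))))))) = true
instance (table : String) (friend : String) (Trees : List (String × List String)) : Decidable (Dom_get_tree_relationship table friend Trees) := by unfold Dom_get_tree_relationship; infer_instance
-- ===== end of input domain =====

-- B replaces A's two membership scans over the dict with an inverted index (value -> trees containing it) answered by two lookups; same return value (alternative algorithm, no speed claim).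

-- ===== PORT A =====
-- two loops: collect keys whose value list contains `table`, then append keys whose list contains `friend`
def get_tree_relationship (table : String) (friend : String) (Trees : List (String × List String)) : List String :=
  let result := Trees.foldl
    (fun res p => if table ∈ PySem.Dict.getD ⟨Trees⟩ p.1 [] then res ++ [p.1] else res) []
  Trees.foldl
    (fun res p => if friend ∈ PySem.Dict.getD ⟨Trees⟩ p.1 [] then res ++ [p.1] else res) result

-- ===== PORT B =====
-- build the inverted index (member value -> trees); `index.setdefault(v, []).append(tree)` is
-- exactly `Dict.modify v [] (· ++ [tree])` (d[k] = d.get(k, []) + [tree]); then two lookups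
def get_tree_relationship_alt (table : String) (friend : String) (Trees : List (String × List String)) : List String :=
  let index := Trees.foldl
    (fun (idx : PySem.Dict String (List String)) p =>
      (PySem.Set.ofList p.2).foldl (fun idx v => idx.modify v [] (· ++ [p.1])) idx)
    PySem.Dict.empty
  index.getD table [] ++ index.getD friend []

-- ===== PRECONDITION & SPEC =====
-- Pre_ excludes association lists with duplicate keys, which cannot arise from a Python dict
-- (A's input is a dict, whose keys are unique by construction); it excludes no input the Python A accepts.
def Pre_get_tree_relationship (table : String) (friend : String) (Trees : List (String × List String)) : Prop := (Trees.map Prod.fst).Nodup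
instance (table : String) (friend : String) (Trees : List (String × List String)) : Decidable (Pre_get_tree_relationship table friend Trees) := by unfold Pre_get_tree_relationship; infer_instance
def pvWitness_get_tree_relationship : String × String × (List (String × List String)) := ("a", "b", [("t", ["a", "c"]), ("u", ["b", "a"])])

def Spec_get_tree_relationship (table : String) (friend : String) (Trees : List (String × List String)) (out : List String) : Prop := out = get_tree_relationship_alt table friend Trees
instance (table : String) (friend : String) (Trees : List (String × List String)) (out : List String) : Decidable (Spec_get_tree_relationship table friend Trees out) := by unfold Spec_get_tree_relationship; infer_instance

-- ===== CLAIM (what is proved, stated in full; the proofs are below) =====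
def Claim_equal_get_tree_relationship : Prop := ∀ (table : String) (friend : String) (Trees : List (String × List String)), Dom_get_tree_relationship table friend Trees → Pre_get_tree_relationship table friend Trees → Spec_get_tree_relationship table friend Trees (get_tree_relationship table friend Trees)

-- ===== LEMMAS AND PROOFS =====

-- on a duplicate-free list, filtering for equality with c keeps exactly c (if present)
theorem filter_beq_of_nodup (s : List String) (h : s.Nodup) (c : String) :
    s.filter (fun v => v == c) = if c ∈ s then [c] else [] := by
  induction s with
  | nil => simp
  | cons hd tl ih =>
    rcases List.nodup_cons.mp h with ⟨hhd, htl⟩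
    by_cases hc : hd = c
    · subst hc
      simp [hhd, ih htl]
    · simp [hc, ih htl, Ne.symm hc]

-- one tree's contribution to the index: key c gains [tree] iff c is among the tree's values
theorem getD_inner_fold (c tree : String) (vs : List String) (d : PySem.Dict String (List String)) :
    ((PySem.Set.ofList vs).foldl (fun idx v => idx.modify v [] (· ++ [tree])) d).getD c []
      = d.getD c [] ++ (if c ∈ vs then [tree] else []) := by
  have h : (PySem.Set.ofList vs).foldl (fun idx v => idx.modify v [] (· ++ [tree])) d
      = ((PySem.Set.ofList vs).map (fun v => (v, tree))).foldl
          (fun idx (p : String × String) => idx.modify p.1 [] (· ++ [p.2])) d := by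
    rw [List.foldl_map]
  rw [h, PySem.Dict.getD_foldl_modify_append, List.filter_map]
  have : ((PySem.Set.ofList vs).filter ((fun p : String × String => p.1 == c) ∘ fun v => (v, tree)))
      = (PySem.Set.ofList vs).filter (fun v => v == c) := by rfl
  rw [this, filter_beq_of_nodup _ (PySem.Set.nodup_ofList vs) c]
  by_cases hc : c ∈ vs
  · simp [PySem.Set.mem_ofList, hc]
  · simp [PySem.Set.mem_ofList, hc]

-- the whole index: the list stored at key c is every tree whose values contain c, in order
theorem getD_build (c : String) (l : List (String × List String)) (d : PySem.Dict String (List String)) :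
    (l.foldl (fun idx p => (PySem.Set.ofList p.2).foldl (fun idx v => idx.modify v [] (· ++ [p.1])) idx) d).getD c []
      = d.getD c [] ++ (l.filter (fun p => decide (c ∈ p.2))).map Prod.fst := by
  induction l generalizing d with
  | nil => simp
  | cons hd tl ih =>
    rw [List.foldl_cons, ih, getD_inner_fold, List.filter_cons]
    by_cases hc : c ∈ hd.2
    · simp [hc]
    · simp [hc]

-- with unique keys, A's lookup Trees[tree] returns that entry's own value list
theorem getD_self (Trees : List (String × List String)) (hnd : (Trees.map Prod.fst).Nodup)
    (p : String × List String) (hp : p ∈ Trees) :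
    PySem.Dict.getD ⟨Trees⟩ p.1 [] = p.2 := by
  exact PySem.Dict.getD_of_mem_items (d := ⟨Trees⟩) hp hnd []

-- A's scan for x equals the filter-map characterisation, given unique keys
theorem scan_eq (x : String) (Trees : List (String × List String)) (hnd : (Trees.map Prod.fst).Nodup) (acc : List String) :
    Trees.foldl (fun res p => if x ∈ PySem.Dict.getD ⟨Trees⟩ p.1 [] then res ++ [p.1] else res) acc
      = acc ++ (Trees.filter (fun p => decide (x ∈ p.2))).map Prod.fst := by
  have h := PySem.List.foldl_congr_mem (l := Trees) (init := acc)
      (f := fun res (p : String × List String) => if x ∈ PySem.Dict.getD ⟨Trees⟩ p.1 [] then res ++ [p.1] else res)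
      (g := fun res p => if x ∈ p.2 then res ++ [p.1] else res)
      (by intro a p hp; simp only [getD_self Trees hnd p hp])
  rw [h]
  exact PySem.List.foldl_append_ite (fun p => x ∈ p.2) Prod.fst Trees acc

-- ===== VERDICT (by name: the statement is the Claim_ definition above) =====
theorem get_tree_relationship_spec : Claim_equal_get_tree_relationship := by
  intro table friend Trees _ hnd
  show _ = _
  unfold get_tree_relationship get_tree_relationship_alt
  rw [scan_eq table Trees hnd, scan_eq friend Trees hnd]
  simp [getD_build]
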